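-- pv_equiv track=rewrite | github.com/jainendra2019/esl | esl/experiments/prototype_recovery_sweep.py | make_balanced_types
-- ===== SOURCE A (Python) =====
-- def make_balanced_types(num_agents: int, K: int) -> list[int]:
--     """Assign agents to types as evenly as possible."""
--     types: list[int] = []
--     for k in range(K):
--         types.extend([k] * (num_agents // K))
--     for r in range(num_agents - len(types)):
--         types.append(r % K)
--     types.sort()
--     return types
-- ===== SOURCE B (Python) =====
-- def make_balanced_types(num_agents: int, K: int) -> list[int]:
--     """Assign agents to types as evenly as possible."""
--     base, extra = divmod(num_agents, K)
--     out: list[int] = []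
--     for k in range(K):
--         out += [k] * (base + (k < extra))
--     return out
-- ===== Notes on version B (the rewrite author's own statement) =====
-- stated objective: simpler
-- what changed: B computes divmod(num_agents, K) once and emits the already-sorted result directly (the first num_agents % K types get one extra copy), eliminating A's per-type division, the remainder append loop and the final sort.
-- outside the precondition, e.g. on make_balanced_types(-1, 0): A returns [], B raises ZeroDivisionError; on make_balanced_types(5, -2): A returns [-1, -1, 0, 0, 0], B returns []
import Mathlib
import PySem

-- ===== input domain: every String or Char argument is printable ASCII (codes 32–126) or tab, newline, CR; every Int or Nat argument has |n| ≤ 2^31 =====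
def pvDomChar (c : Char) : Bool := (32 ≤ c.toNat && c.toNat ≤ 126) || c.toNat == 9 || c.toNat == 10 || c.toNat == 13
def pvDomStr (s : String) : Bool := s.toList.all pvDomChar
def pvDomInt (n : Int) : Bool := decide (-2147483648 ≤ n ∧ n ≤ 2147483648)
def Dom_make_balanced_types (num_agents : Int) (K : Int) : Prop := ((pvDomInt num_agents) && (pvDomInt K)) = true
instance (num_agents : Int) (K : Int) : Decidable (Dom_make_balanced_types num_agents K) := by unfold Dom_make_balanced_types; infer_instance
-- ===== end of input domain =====

-- B builds the sorted balanced assignment directly from one divmod (first num_agents % K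
-- types get an extra copy), replacing A's two loops and final sort with a single direct construction.


-- ===== PORT A =====
def make_balanced_types (num_agents : Int) (K : Int) : List Int :=
  let types : List Int := []
  let types := (PySem.List.pyRange 0 K 1).foldl
    (fun types k => types ++ PySem.List.pyRepeat [k] (PySem.Int.floordiv num_agents K)) types
  let types := (PySem.List.pyRange 0 (num_agents - (types.length : Int)) 1).foldl
    (fun types r => types ++ [PySem.Int.mod r K]) types
  PySem.List.sorted types (fun x => x) false

-- ===== PORT B =====
def make_balanced_types_alt (num_agents : Int) (K : Int) : List Int :=
  let base := PySem.Int.floordiv num_agents K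
  let extra := PySem.Int.mod num_agents K
  (PySem.List.pyRange 0 K 1).foldl
    (fun out k => out ++ PySem.List.pyRepeat [k] (base + (if k < extra then 1 else 0))) []

-- ===== PRECONDITION & SPEC =====
-- Pre_ restricts to the function's natural domain, a positive number of types K ≥ 1: for K = 0
-- A raises ZeroDivisionError when num_agents > 0 (and B's divmod raises for every num_agents),
-- and a negative number of types is outside the function's purpose.
def Pre_make_balanced_types (num_agents : Int) (K : Int) : Prop := 1 ≤ K
instance (num_agents : Int) (K : Int) : Decidable (Pre_make_balanced_types num_agents K) := by unfold Pre_make_balanced_types; infer_instance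
def pvWitness_make_balanced_types : Int × Int := (7, 3)
def Spec_make_balanced_types (num_agents : Int) (K : Int) (out : List Int) : Prop := out = make_balanced_types_alt num_agents K
instance (num_agents : Int) (K : Int) (out : List Int) : Decidable (Spec_make_balanced_types num_agents K out) := by unfold Spec_make_balanced_types; infer_instance

-- ===== CLAIM (what is proved, stated in full; the proofs are below) =====
def Claim_equal_make_balanced_types : Prop := ∀ (num_agents : Int) (K : Int), Dom_make_balanced_types num_agents K → Pre_make_balanced_types num_agents K → Spec_make_balanced_types num_agents K (make_balanced_types num_agents K)

-- ===== LEMMAS AND PROOFS =====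

-- flatMap of a pointwise append is a permutation of the two flatMaps
lemma flatMap_append_perm {α β : Type} (l : List α) (f g : α → List β) :
    (l.flatMap (fun x => f x ++ g x)).Perm (l.flatMap f ++ l.flatMap g) := by
  induction l with
  | nil => simp
  | cons a t ih =>
    simp only [List.flatMap_cons, List.append_assoc]
    exact ((ih.append_left (g a)).append_left (f a)).trans
      ((List.perm_append_comm_assoc (g a) (t.flatMap f) (t.flatMap g)).append_left (f a))

-- blocks of constant value over a strictly increasing key list are sorted
lemma pairwise_flatMap_const (l : List Int) (h : Int → List Int)
    (hl : l.Pairwise (· < ·)) (hc : ∀ k ∈ l, ∀ x ∈ h k, x = k) :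
    (l.flatMap h).Pairwise (· ≤ ·) := by
  induction l with
  | nil => simp
  | cons a t ih =>
    simp only [List.flatMap_cons]
    rcases List.pairwise_cons.mp hl with ⟨ha, ht⟩
    refine List.pairwise_append.mpr ⟨?_, ih ht (fun k hk => hc k (by simp [hk])), ?_⟩
    · refine List.Pairwise.imp_of_mem ?_ (List.pairwise_of_forall_mem_list (l := h a) (r := fun x y => x = a ∧ y = a) ?_)
      · rintro x y _ _ ⟨hx, hy⟩; omega
      · intro x hx y hy; exact ⟨hc a (by simp) x hx, hc a (by simp) y hy⟩
    · intro x hx y hy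
      rcases List.mem_flatMap.mp hy with ⟨b, hb, hyb⟩
      have hxa := hc a (by simp) x hx
      have hyb' := hc b (by simp [hb]) y hyb
      have := ha b hb
      omega

-- the 0/1-extra blocks flatten to exactly range(extra)
lemma flatMap_ite_singleton (K extra : Int) (h0 : 0 ≤ extra) (h1 : extra ≤ K) :
    (PySem.List.pyRange 0 K 1).flatMap (fun k => if k < extra then [k] else []) =
      PySem.List.pyRange 0 extra 1 := by
  rw [PySem.List.pyRange_one_append 0 extra K h0 h1, List.flatMap_append]
  have e1 : (PySem.List.pyRange 0 extra 1).flatMap (fun k => if k < extra then [k] else []) =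
      (PySem.List.pyRange 0 extra 1).flatMap (fun k => [k]) := by
    apply List.flatMap_congr
    intro k hk
    rcases (PySem.List.mem_pyRange_one).mp hk with ⟨_, hlt⟩
    simp [hlt]
  have e2 : (PySem.List.pyRange extra K 1).flatMap (fun k => if k < extra then [k] else []) =
      (PySem.List.pyRange extra K 1).flatMap (fun _ => ([] : List Int)) := by
    apply List.flatMap_congr
    intro k hk
    rcases (PySem.List.mem_pyRange_one).mp hk with ⟨hge, _⟩
    simp [not_lt.mpr hge]
  simp [e1, e2]

theorem make_balanced_types_spec : Claim_equal_make_balanced_types := by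
  intro n K _ hK
  unfold Spec_make_balanced_types make_balanced_types make_balanced_types_alt
  simp only [PySem.List.foldl_append_eq_flatMap, List.nil_append]
  set q := PySem.Int.floordiv n K with hq
  set rem := PySem.Int.mod n K with hrem
  have hKpos : (0:Int) < K := hK
  have hdm : q * K + rem = n := PySem.Int.floordiv_mul_add_mod n K
  have hrb : 0 ≤ rem ∧ rem < K := by
    rw [hrem, PySem.Int.mod_eq_emod_of_pos hKpos]
    exact ⟨Int.emod_nonneg n (by omega), Int.emod_lt_of_pos n hKpos⟩
  by_cases hn : 0 ≤ n
  · -- q ≥ 0; the sorted list is exactly B's list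
    have hq0 : 0 ≤ q := by
      rw [hq, PySem.Int.floordiv_eq_ediv_of_pos hKpos]
      exact Int.ediv_nonneg hn (by omega)
    have hlen : (((PySem.List.pyRange 0 K 1).flatMap
        (fun k => PySem.List.pyRepeat [k] q)).length : Int) = K * q := by
      rw [List.length_flatMap]
      have e : ((PySem.List.pyRange 0 K 1).map
          (fun k => (PySem.List.pyRepeat [k] q).length)) =
          (PySem.List.pyRange 0 K 1).map (fun _ => q.toNat) := by
        apply List.map_congr_left; intro k _; simp [PySem.List.pyRepeat_singleton]
      rw [e, List.map_const', List.sum_replicate, smul_eq_mul, PySem.List.length_pyRange_one]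
      push_cast [Int.toNat_of_nonneg hq0, Int.toNat_of_nonneg (show (0:Int) ≤ K - 0 by omega)]
      ring
    rw [hlen]
    have hrem2 : n - K * q = rem := by nlinarith [hdm]
    rw [hrem2]
    -- the second loop appends range(rem) itself
    have hmap : (PySem.List.pyRange 0 rem 1).flatMap (fun r => [PySem.Int.mod r K]) =
        PySem.List.pyRange 0 rem 1 := by
      have e : (PySem.List.pyRange 0 rem 1).flatMap (fun r => [PySem.Int.mod r K]) =
          (PySem.List.pyRange 0 rem 1).flatMap (fun r => [r]) := by
        apply List.flatMap_congr
        intro r hr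
        rcases (PySem.List.mem_pyRange_one).mp hr with ⟨h0, h1⟩
        rw [PySem.Int.mod_eq_emod_of_pos hKpos, Int.emod_eq_of_lt h0 (by omega)]
      simpa using e
    rw [hmap]
    -- B's list is a sorted permutation of A's pre-sort list
    apply PySem.List.sorted_id_eq_of_perm_of_pairwise
    · -- permutation
      have hsplit : ∀ k ∈ PySem.List.pyRange 0 K 1,
          (fun k => PySem.List.pyRepeat [k] (q + if k < rem then 1 else 0)) k =
          (fun k => PySem.List.pyRepeat [k] q ++ (if k < rem then [k] else [])) k := by
        intro k _
        by_cases h : k < rem <;>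
          simp [h, PySem.List.pyRepeat_singleton, Int.toNat_add hq0, List.replicate_succ']
      rw [List.flatMap_congr hsplit,
        ← flatMap_ite_singleton K rem hrb.1 (le_of_lt hrb.2)]
      exact flatMap_append_perm _ _ _
    · -- sortedness of B's list
      apply pairwise_flatMap_const _ _ (PySem.List.pairwise_lt_pyRange_one 0 K)
      intro k _ x hx
      simp only [PySem.List.pyRepeat_singleton, List.mem_replicate] at hx
      exact hx.2
  · -- n < 0: both sides are the empty list
    have hqneg : q < 0 := by nlinarith [hdm, hrb.1, hrb.2]
    have e1 : (PySem.List.pyRange 0 K 1).flatMap (fun k => PySem.List.pyRepeat [k] q) = [] := by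
      apply List.flatMap_eq_nil_iff.mpr
      intro k _; simp [PySem.List.pyRepeat_singleton, Int.toNat_of_nonpos (le_of_lt hqneg)]
    have e2 : (PySem.List.pyRange 0 K 1).flatMap
        (fun k => PySem.List.pyRepeat [k] (q + if k < rem then 1 else 0)) = [] := by
      apply List.flatMap_eq_nil_iff.mpr
      intro k _
      have hle : q + (if k < rem then 1 else 0) ≤ 0 := by split <;> omega
      simp [PySem.List.pyRepeat_singleton, Int.toNat_of_nonpos hle]
    rw [e1, e2]
    have e3 : PySem.List.pyRange 0 (n - (([] : List Int).length : Int)) 1 = [] :=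
      PySem.List.pyRange_one_eq_nil (by simp; omega)
    rw [e3]
    simp [PySem.List.sorted]
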